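-- pv_equiv track=rewrite | github.com/Kekega/tphya-lab1 | main.py | get_raw_rules
-- ===== SOURCE A (Python) =====
-- def get_raw_rules(d, item):
--     pattern = ""
--     for symbol in item:
--         if symbol in d.keys():
--             pattern += "_"
--         else:
--             pattern += symbol
--     return pattern
-- ===== SOURCE B (Python) =====
-- def get_raw_rules(d, item):
--     table = {ord(k): "_" for k in d if isinstance(k, str) and len(k) == 1}
--     return item.translate(table)
-- ===== Notes on version B (the rewrite author's own statement) =====
-- stated objective: idiomatic
-- what changed: Replaces the per-character dict-membership loop with a translation table of single-character keys built once and a single C-level str.translate pass.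
import Mathlib
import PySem

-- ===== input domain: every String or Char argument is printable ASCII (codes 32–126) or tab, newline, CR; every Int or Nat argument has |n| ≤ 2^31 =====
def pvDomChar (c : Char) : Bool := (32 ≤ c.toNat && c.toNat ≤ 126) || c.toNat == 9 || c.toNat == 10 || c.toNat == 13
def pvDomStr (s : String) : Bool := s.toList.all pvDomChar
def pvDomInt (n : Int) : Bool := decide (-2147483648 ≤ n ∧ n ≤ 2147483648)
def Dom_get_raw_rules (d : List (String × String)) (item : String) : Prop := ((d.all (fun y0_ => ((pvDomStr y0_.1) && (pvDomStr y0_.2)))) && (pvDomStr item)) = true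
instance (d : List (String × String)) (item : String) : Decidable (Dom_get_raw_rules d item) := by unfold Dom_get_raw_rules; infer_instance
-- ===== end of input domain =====

-- B replaces the per-character membership loop with a translation table of single-character keys built once, then a single masking pass (idiomatic str.translate).
-- ===== PORT A =====
def get_raw_rules (d : List (String × String)) (item : String) : String :=
  String.ofList ((item.toList).foldl (fun pattern symbol =>
    pattern ++ [if (d.map Prod.fst).contains (String.ofList [symbol]) then '_' else symbol]) [])

-- ===== PORT B =====
def get_raw_rules_alt (d : List (String × String)) (item : String) : String :=
  let table : List Char := d.filterMap (fun kv =>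
    match kv.1.toList with
    | [c] => some c
    | _ => none)
  String.ofList ((item.toList).map (fun c => if table.contains c then '_' else c))

-- ===== PRECONDITION & SPEC =====
def Spec_get_raw_rules (d : List (String × String)) (item : String) (out : String) : Prop := out = get_raw_rules_alt d item
instance (d : List (String × String)) (item : String) (out : String) : Decidable (Spec_get_raw_rules d item out) := by unfold Spec_get_raw_rules; infer_instance

-- ===== CLAIM (what is proved, stated in full; the proofs are below) =====
def Claim_equal_get_raw_rules : Prop := ∀ (d : List (String × String)) (item : String), Dom_get_raw_rules d item → Spec_get_raw_rules d item (get_raw_rules d item)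

-- ===== LEMMAS AND PROOFS =====

-- ===== VERDICT (by name: the statement is the Claim_ definition above) =====
theorem pv_foldl_append (f : Char → Char) : ∀ (l acc : List Char),
    l.foldl (fun p s => p ++ [f s]) acc = acc ++ l.map f := by
  intro l
  induction l with
  | nil => simp
  | cons c t ih => intro acc; simp [List.foldl, ih]

theorem pv_f_eq (s : String) (c : Char) :
    ((match s.toList with | [c] => some c | _ => none) = some c) ↔ s = String.ofList [c] := by
  rcases h : s.toList with _ | ⟨c1, _ | ⟨c2, rest⟩⟩ <;> simp
  · intro he; apply_fun String.toList at he; simp_all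
  · constructor
    · intro he; subst he; apply String.ext; simpa using h
    · intro he; subst he; simpa using h.symm
  · intro he; apply_fun String.toList at he; simp_all

theorem pv_mem_iff (d : List (String × String)) (c : Char) :
    ((d.map Prod.fst).contains (String.ofList [c])
      = (d.filterMap (fun kv =>
          match kv.1.toList with
          | [c] => some c
          | _ => none)).contains c) := by
  simp only [List.contains_eq_mem, decide_eq_decide, List.mem_map, List.mem_filterMap]
  constructor
  · rintro ⟨kv, hm, he⟩
    exact ⟨kv, hm, (pv_f_eq kv.1 c).2 he⟩
  · rintro ⟨kv, hm, he⟩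
    exact ⟨kv, hm, (pv_f_eq kv.1 c).1 he⟩

theorem get_raw_rules_spec : Claim_equal_get_raw_rules := by
  intro d item _
  unfold Spec_get_raw_rules get_raw_rules get_raw_rules_alt
  rw [pv_foldl_append]
  simp only [List.nil_append]
  congr 1
  apply List.map_congr_left
  intro c _
  rw [pv_mem_iff]
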